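-- pv_equiv track=rewrite | github.com/adrianlee1005/language-modeling-predictor | language_modeling_predictor.py | separateWords
-- ===== SOURCE A (Python) =====
-- import string
--
-- def separateWords(line):
--     list4=[]
--     nospace = ""
--     for hairband in line:
--         if hairband in string.punctuation and hairband != "'":
--             if nospace:
--                 list4.append(nospace)
--             list4.append(hairband)
--             nospace = ""
--         elif hairband == " ":
--             if nospace:
--                 list4.append(nospace)
--                 nospace = ""
--         else:
--             nospace += hairband
--     if nospace:
--         list4.append(nospace)
--     return list4
-- ===== SOURCE B (Python) =====
-- import string
--
-- _PUNCT = set(string.punctuation) - {"'"}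
--
-- def separateWords(line):
--     # scan by maximal runs: emit each punctuation char, skip spaces,
--     # emit each maximal run of word characters as one slice
--     out = []
--     i, n = 0, len(line)
--     while i < n:
--         c = line[i]
--         if c in _PUNCT:
--             out.append(c)
--             i += 1
--         elif c == " ":
--             i += 1
--         else:
--             j = i + 1
--             while j < n and line[j] not in _PUNCT and line[j] != " ":
--                 j += 1
--             out.append(line[i:j])
--             i = j
--     return out
-- ===== Notes on version B (the rewrite author's own statement) =====
-- stated objective: alternative
-- what changed: A accumulates the current word character by character in a growing string with flush-on-delimiter bookkeeping; B is an index-based scanner that, at each position, emits a punctuation char, skips a space, or takes the whole maximal word run as one slice.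
import Mathlib
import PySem

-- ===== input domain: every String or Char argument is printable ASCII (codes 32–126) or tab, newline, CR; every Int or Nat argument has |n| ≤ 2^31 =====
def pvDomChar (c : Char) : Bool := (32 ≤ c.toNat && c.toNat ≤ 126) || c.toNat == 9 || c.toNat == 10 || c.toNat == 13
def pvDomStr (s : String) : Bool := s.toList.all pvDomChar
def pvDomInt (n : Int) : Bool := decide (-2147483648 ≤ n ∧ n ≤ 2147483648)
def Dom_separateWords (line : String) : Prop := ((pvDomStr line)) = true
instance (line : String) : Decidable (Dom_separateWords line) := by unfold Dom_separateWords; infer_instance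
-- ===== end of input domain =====

-- B re-implements A's char-by-char accumulator loop as a maximal-run scanner (same return value; objective: alternative).

-- ===== PORT A =====
-- string.punctuation
def pyPunct : List Char := "!\"#$%&'()*+,-./:;<=>?@[\\]^_`{|}~".toList

-- one iteration of A's for-loop; state = (list4, nospace as List Char)
def aStep (p : List String × List Char) (c : Char) : List String × List Char :=
  if pyPunct.contains c && c != '\'' then
    ((if p.2.isEmpty then p.1 else p.1 ++ [String.mk p.2]) ++ [String.mk [c]], [])
  else if c = ' ' then
    (if p.2.isEmpty then p else (p.1 ++ [String.mk p.2], []))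
  else (p.1, p.2 ++ [c])

def separateWords (line : String) : List String :=
  let r := line.toList.foldl aStep ([], [])
  if r.2.isEmpty then r.1 else r.1 ++ [String.mk r.2]

-- ===== PORT B =====
-- set(string.punctuation) - {"'"}
def bPunct : List Char := pyPunct.filter (fun c => c != '\'')

def bWordChar (c : Char) : Bool := !(bPunct.contains c) && c != ' '

-- B's index loop: each step consumes one punctuation char, one space, or a maximal word run
def bGo : List Char → List String
  | [] => []
  | c :: cs =>
    if bPunct.contains c then String.mk [c] :: bGo cs
    else if c = ' ' then bGo cs
    else String.mk (c :: cs.takeWhile bWordChar) :: bGo (cs.dropWhile bWordChar)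
termination_by cs => cs.length
decreasing_by
  · simp
  · simp
  · exact Nat.lt_succ_of_le (List.length_dropWhile_le _ _)

def separateWords_alt (line : String) : List String := bGo line.toList

-- ===== PRECONDITION & SPEC =====
def Spec_separateWords (line : String) (out : List String) : Prop := out = separateWords_alt line
instance (line : String) (out : List String) : Decidable (Spec_separateWords line out) := by unfold Spec_separateWords; infer_instance

-- ===== CLAIM (what is proved, stated in full; the proofs are below) =====
def Claim_equal_separateWords : Prop := ∀ (line : String), Dom_separateWords line → Spec_separateWords line (separateWords line)

-- ===== LEMMAS AND PROOFS =====

-- A's loop, continued from a state and then finished, as one function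
def aGo (p : List String × List Char) (cs : List Char) : List String :=
  let r := cs.foldl aStep p
  if r.2.isEmpty then r.1 else r.1 ++ [String.mk r.2]

-- B's scan with a pending (already accumulated) word ns in front
def bCarry (ns : List Char) (cs : List Char) : List String :=
  match cs with
  | [] => if ns.isEmpty then [] else [String.mk ns]
  | c :: cs' =>
    if bPunct.contains c then
      (if ns.isEmpty then [] else [String.mk ns]) ++ String.mk [c] :: bGo cs'
    else if c = ' ' then (if ns.isEmpty then [] else [String.mk ns]) ++ bGo cs'
    else String.mk (ns ++ c :: cs'.takeWhile bWordChar) :: bGo (cs'.dropWhile bWordChar)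

lemma aGo_cons (p : List String × List Char) (c : Char) (cs : List Char) :
    aGo p (c :: cs) = aGo (aStep p c) cs := rfl

lemma aStep_punct (l : List String) (ns : List Char) (c : Char)
    (hp : (pyPunct.contains c && c != '\'') = true) :
    aStep (l, ns) c = ((if ns.isEmpty then l else l ++ [String.mk ns]) ++ [String.mk [c]], []) := by
  simp only [aStep]; rw [if_pos hp]

lemma aStep_space (l : List String) (ns : List Char) (c : Char)
    (hp : ¬ (pyPunct.contains c && c != '\'') = true) (hs : c = ' ') :
    aStep (l, ns) c = (if ns.isEmpty then (l, ns) else (l ++ [String.mk ns], [])) := by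
  simp only [aStep]; rw [if_neg hp, if_pos hs]

lemma aStep_word (l : List String) (ns : List Char) (c : Char)
    (hp : ¬ (pyPunct.contains c && c != '\'') = true) (hs : ¬ c = ' ') :
    aStep (l, ns) c = (l, ns ++ [c]) := by
  simp only [aStep]; rw [if_neg hp, if_neg hs]

lemma sep_eq (c : Char) : bPunct.contains c = (pyPunct.contains c && c != '\'') := by
  simp [bPunct, List.contains_eq_mem, List.mem_filter]
  tauto

lemma aGo_factor (cs : List Char) : ∀ (l : List String) (ns : List Char),
    aGo (l, ns) cs = l ++ aGo ([], ns) cs := by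
  induction cs with
  | nil => intro l ns; simp only [aGo, List.foldl_nil]; split <;> simp
  | cons c cs ih =>
    intro l ns
    have key : ∀ (X Y : List String), X = l ++ Y → aGo (X, []) cs = l ++ aGo (Y, []) cs := by
      intro X Y h; rw [ih X [], ih Y [], h]; simp
    rw [aGo_cons, aGo_cons]
    by_cases hp : (pyPunct.contains c && c != '\'') = true
    · rw [aStep_punct l ns c hp, aStep_punct [] ns c hp]
      split_ifs with hns <;> exact key _ _ (by simp)
    · by_cases hs : c = ' '
      · rw [aStep_space l ns c hp hs, aStep_space [] ns c hp hs]
        split_ifs with hns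
        · exact ih l ns
        · exact key _ _ (by simp)
      · rw [aStep_word l ns c hp hs, aStep_word [] ns c hp hs]
        exact ih l _

lemma bCarry_nil_left (cs : List Char) : bCarry [] cs = bGo cs := by
  cases cs with
  | nil => simp [bCarry, bGo]
  | cons c cs' =>
    simp only [bCarry, bGo]
    split_ifs <;> simp_all

lemma bGo_carry (cs : List Char) (ns : List Char) (c : Char) (_hc : bWordChar c = true) :
    String.mk (ns ++ c :: cs.takeWhile bWordChar) :: bGo (cs.dropWhile bWordChar)
      = bCarry (ns ++ [c]) cs := by
  cases cs with
  | nil => simp [bCarry, bGo]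
  | cons d cs' =>
    simp only [bCarry]
    by_cases hdp : d ∈ bPunct
    · have hd : bWordChar d = false := by simp [bWordChar, hdp]
      simp [bGo, hd, hdp]
    · by_cases hds : d = ' '
      · subst hds
        have hd : bWordChar ' ' = false := by decide
        simp [bGo, hd, hdp]
      · have hd : bWordChar d = true := by simp [bWordChar, hdp, hds]
        simp [hd, hdp, hds]

-- the heart: A's loop from state ([], ns) computes B's scan with the pending word ns
lemma aGo_eq_bCarry (cs : List Char) : ∀ (ns : List Char), aGo ([], ns) cs = bCarry ns cs := by
  induction cs with
  | nil => intro ns; simp only [aGo, List.foldl_nil, bCarry]; split <;> simp_all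
  | cons c cs' ih =>
    intro ns
    rw [aGo_cons]
    by_cases hp : bPunct.contains c = true
    · have hp' : (pyPunct.contains c && c != '\'') = true := by rw [← sep_eq]; exact hp
      rw [aStep_punct [] ns c hp', aGo_factor, ih [], bCarry_nil_left]
      simp only [bCarry]
      rw [if_pos hp]
      split_ifs with hns <;> simp
    · have hp' : ¬ (pyPunct.contains c && c != '\'') = true := by rw [← sep_eq]; exact hp
      by_cases hs : c = ' '
      · rw [aStep_space [] ns c hp' hs]
        simp only [bCarry]
        rw [if_neg hp, if_pos hs]
        split_ifs with hns
        · have : ns = [] := List.isEmpty_iff.mp hns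
          subst this
          rw [ih [], bCarry_nil_left]
          simp
        · rw [aGo_factor, ih [], bCarry_nil_left]; simp
      · have hpc : c ∉ bPunct := by simpa using hp
        have hw : bWordChar c = true := by simp [bWordChar, hs, hpc]
        rw [aStep_word [] ns c hp' hs, ih (ns ++ [c]), ← bGo_carry cs' ns c hw]
        simp only [bCarry]
        rw [if_neg hp, if_neg hs]

-- ===== VERDICT (by name: the statement is the Claim_ definition above) =====
theorem separateWords_spec : Claim_equal_separateWords := by
  intro line _
  show separateWords line = separateWords_alt line
  have h1 : separateWords line = aGo ([], []) line.toList := rfl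
  rw [h1, aGo_eq_bCarry, bCarry_nil_left]
  rfl
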